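-- pv_equiv track=rewrite | github.com/learnwithjuni/USACO-Bronze- | UB14-Prime-Cryptarithm/main.py | generateOptions
-- ===== SOURCE A (Python) =====
-- def generateOptions(nums):
--     numOneOptions = []
--     numTwoOptions = []
--
--     for i in nums:
--         for j in nums:
--             for k in nums:
--                 numOneOptions.append(i+j+k)
--
--     for i in nums:
--         for j in nums:
--             numTwoOptions.append(i+j)
--
--     return numOneOptions, numTwoOptions
-- ===== SOURCE B (Python) =====
-- def generateOptions(nums):
--     # Build pair sums once, then derive triple sums from that table.
--     numTwoOptions = [i + j for i in nums for j in nums]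
--     numOneOptions = [s + k for s in numTwoOptions for k in nums]
--     return numOneOptions, numTwoOptions
-- ===== Notes on version B (the rewrite author's own statement) =====
-- stated objective: alternative
-- what changed: B computes the pair-sum list once with a comprehension and derives the triple sums by adding each k to every stored pair sum, instead of an independent triple-nested loop recomputing i+j in the innermost loop.
import Mathlib
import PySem

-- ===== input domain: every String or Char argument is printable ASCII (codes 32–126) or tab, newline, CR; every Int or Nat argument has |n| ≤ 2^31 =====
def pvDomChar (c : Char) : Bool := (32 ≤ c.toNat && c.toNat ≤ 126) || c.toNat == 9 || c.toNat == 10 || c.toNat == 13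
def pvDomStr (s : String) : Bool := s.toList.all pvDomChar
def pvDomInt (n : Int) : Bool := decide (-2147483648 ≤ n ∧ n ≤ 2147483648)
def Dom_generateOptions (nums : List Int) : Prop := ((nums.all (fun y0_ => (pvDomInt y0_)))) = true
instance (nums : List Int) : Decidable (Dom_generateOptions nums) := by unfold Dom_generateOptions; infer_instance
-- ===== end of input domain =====

-- ===== PORT A =====
-- triple-nested append loops, then double-nested append loops
def generateOptions (nums : List Int) : List Int × List Int :=
  let numOneOptions : List Int :=
    nums.foldl (fun acc i =>
      nums.foldl (fun acc j =>
        nums.foldl (fun acc k => acc ++ [i + j + k]) acc) acc) []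
  let numTwoOptions : List Int :=
    nums.foldl (fun acc i =>
      nums.foldl (fun acc j => acc ++ [i + j]) acc) []
  (numOneOptions, numTwoOptions)

-- ===== PORT B =====
-- B: pair sums built once; triple sums derived from the pair-sum table
def generateOptions_alt (nums : List Int) : List Int × List Int :=
  let numTwoOptions : List Int := nums.flatMap (fun i => nums.map (fun j => i + j))
  let numOneOptions : List Int := numTwoOptions.flatMap (fun s => nums.map (fun k => s + k))
  (numOneOptions, numTwoOptions)

-- ===== PRECONDITION & SPEC =====
def Spec_generateOptions (nums : List Int) (out : List Int × List Int) : Prop := out = generateOptions_alt nums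
instance (nums : List Int) (out : List Int × List Int) : Decidable (Spec_generateOptions nums out) := by unfold Spec_generateOptions; infer_instance

-- ===== CLAIM (what is proved, stated in full; the proofs are below) =====
def Claim_equal_generateOptions : Prop := ∀ (nums : List Int), Dom_generateOptions nums → Spec_generateOptions nums (generateOptions nums)

-- ===== LEMMAS AND PROOFS =====

-- ===== VERDICT (by name: the statement is the Claim_ definition above) =====
theorem generateOptions_spec : Claim_equal_generateOptions := by
  intro nums _
  unfold Spec_generateOptions generateOptions generateOptions_alt
  simp only [PySem.List.foldl_append_singleton_eq_map, PySem.List.foldl_append_eq_flatMap,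
    List.nil_append, List.flatMap_assoc, List.flatMap_map]
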